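-- pv_equiv track=rewrite | github.com/juzoanya/transcendence | backend/user/utils.py | calculate_user_xp
-- ===== SOURCE A (Python) =====
-- def calculate_user_xp(margin, winner):
--     xp_map = {
--         range(1, 4): 1,
--         range(4, 7): 2,
--         range(7, 10): 3
--     }
--     xp = 0
--     for margin_range, xp_value in xp_map.items():
--         if margin in margin_range:
--             xp = xp_value if winner else -xp_value
--     return xp
-- ===== SOURCE B (Python) =====
-- def calculate_user_xp(margin, winner):
--     s = 1 if winner else -1
--     if margin in range(1, 10):
--         return s * (int((margin - 1) // 3) + 1)
--     return 0
-- ===== Notes on version B (the rewrite author's own statement) =====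
-- stated objective: simpler
-- what changed: Replaced the dict-of-ranges loop with a single range-membership guard and a closed-form integer formula (margin-1)//3 + 1 times a sign.
import Mathlib
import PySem

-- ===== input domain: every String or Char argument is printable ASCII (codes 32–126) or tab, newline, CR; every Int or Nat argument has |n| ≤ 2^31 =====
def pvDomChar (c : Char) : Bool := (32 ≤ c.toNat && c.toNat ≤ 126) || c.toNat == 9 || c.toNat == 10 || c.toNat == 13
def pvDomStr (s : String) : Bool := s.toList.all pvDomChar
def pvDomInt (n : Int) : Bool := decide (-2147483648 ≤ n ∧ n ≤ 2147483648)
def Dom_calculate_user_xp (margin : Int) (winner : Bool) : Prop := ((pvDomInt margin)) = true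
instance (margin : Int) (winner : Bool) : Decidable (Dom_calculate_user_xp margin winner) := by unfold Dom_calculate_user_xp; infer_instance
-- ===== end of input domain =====

-- B replaces A's dict-of-ranges loop with a single range guard plus a closed-form formula (simpler).


-- ===== PORT A =====
-- the dict {range(1,4):1, range(4,7):2, range(7,10):3}: ranges as (lo, hi) pairs
def calculate_user_xp_xp_map : List ((Int × Int) × Int) :=
  [((1, 4), 1), ((4, 7), 2), ((7, 10), 3)]

-- the for-loop over xp_map.items(), updating xp when margin ∈ margin_range
def calculate_user_xp (margin : Int) (winner : Bool) : Int :=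
  calculate_user_xp_xp_map.foldl
    (fun xp item =>
      if item.1.1 ≤ margin ∧ margin < item.1.2 then
        (if winner then item.2 else -item.2)
      else xp)
    0

-- ===== PORT B =====
def calculate_user_xp_alt (margin : Int) (winner : Bool) : Int :=
  let s : Int := if winner then 1 else -1
  if 1 ≤ margin ∧ margin < 10 then
    s * (PySem.Int.floordiv (margin - 1) 3 + 1)
  else 0

-- ===== PRECONDITION & SPEC =====
def Spec_calculate_user_xp (margin : Int) (winner : Bool) (out : Int) : Prop := out = calculate_user_xp_alt margin winner
instance (margin : Int) (winner : Bool) (out : Int) : Decidable (Spec_calculate_user_xp margin winner out) := by unfold Spec_calculate_user_xp; infer_instance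

-- ===== CLAIM (what is proved, stated in full; the proofs are below) =====
def Claim_equal_calculate_user_xp : Prop := ∀ (margin : Int) (winner : Bool), Dom_calculate_user_xp margin winner → Spec_calculate_user_xp margin winner (calculate_user_xp margin winner)

-- ===== LEMMAS AND PROOFS =====

-- ===== VERDICT (by name: the statement is the Claim_ definition above) =====
theorem calculate_user_xp_spec : Claim_equal_calculate_user_xp := by
  intro margin winner _
  unfold Spec_calculate_user_xp calculate_user_xp calculate_user_xp_alt calculate_user_xp_xp_map
  by_cases h : 1 ≤ margin ∧ margin < 10
  · obtain ⟨h1, h2⟩ := h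
    interval_cases margin <;> cases winner <;> decide
  · simp only [List.foldl]
    have h1 : ¬((1:Int) ≤ margin ∧ margin < 4) := by omega
    have h2 : ¬((4:Int) ≤ margin ∧ margin < 7) := by omega
    have h3 : ¬((7:Int) ≤ margin ∧ margin < 10) := by omega
    simp [h, h1, h2, h3]
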